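-- pv_equiv track=rewrite | github.com/yeahaluu/Algorithm | PROGRAMMERS/PROG_모의고사.py | solution
-- ===== SOURCE A (Python) =====
-- def solution(answers):
--     students=[[1, 2, 3, 4, 5],
--               [2, 1, 2, 3, 2, 4, 2, 5],
--               [3, 3, 1, 1, 2, 2, 4, 4, 5, 5]]
--     good_stud = []
--     score = [0, 0, 0]
--     rep1, rep2, rep3 = 0, 0, 0
--     # 답을 돌아가면서 비교하며 각 학생의 score 계산
--     for i in range(len(answers)):
--         if answers[i] == students[0][rep1]:
--             score[0] += 1
--         if answers[i] == students[1][rep2]: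
--             score[1] += 1
--         if answers[i] == students[2][rep3]:
--             score[2] += 1
--         # rep 돌아가며 반복문을 넘으면 다시 0으로
--         if rep1 == len(students[0])-1: rep1 = 0
--         else: rep1 += 1
--         if rep2 == len(students[1])-1: rep2 = 0
--         else: rep2 += 1
--         if rep3 == len(students[2])-1: rep3 = 0
--         else: rep3 += 1
--     # max 스코어를 가진 학생 답 출력에 넣기
--     for j in range(3):
--         if max(score) == score[j]:
--             good_stud.append(j+1)
--     return good_stud
-- ===== SOURCE B (Python) =====
-- def solution(answers):
--     patterns = [[1, 2, 3, 4, 5],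
--                 [2, 1, 2, 3, 2, 4, 2, 5],
--                 [3, 3, 1, 1, 2, 2, 4, 4, 5, 5]]
--
--     def score(p, l):
--         # compare the answer sheet against whole copies of the pattern,
--         # one pattern-sized chunk at a time (zip truncates the last chunk)
--         s = 0
--         i = 0
--         while i < len(l):
--             chunk = l[i:i + len(p)]
--             s += sum(x == y for x, y in zip(chunk, p))
--             i += len(p)
--         return s
--
--     scores = [score(p, answers) for p in patterns]
--     best = max(scores)
--     return [j + 1 for j, s in enumerate(scores) if s == best]
-- ===== Notes on version B (the rewrite author's own statement) =====
-- stated objective: alternative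
-- what changed: Replaces A's single indexed loop with three manually reset cyclic counters by a chunk-and-zip scheme: the answer sheet is cut into pattern-sized slices and each slice is zipped against the whole pattern, so no index arithmetic or counter state exists at all; then max over the three scores.
import Mathlib
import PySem

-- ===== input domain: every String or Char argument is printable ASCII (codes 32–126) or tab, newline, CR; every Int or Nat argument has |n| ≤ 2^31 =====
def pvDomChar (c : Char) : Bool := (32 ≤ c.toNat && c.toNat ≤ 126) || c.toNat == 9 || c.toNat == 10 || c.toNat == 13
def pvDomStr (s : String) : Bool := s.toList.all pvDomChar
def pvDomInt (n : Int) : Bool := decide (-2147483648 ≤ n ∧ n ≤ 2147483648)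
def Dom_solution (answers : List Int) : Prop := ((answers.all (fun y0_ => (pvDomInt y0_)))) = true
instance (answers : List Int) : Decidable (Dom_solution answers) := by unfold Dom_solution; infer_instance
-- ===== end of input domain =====

-- B scores each pattern by cutting the answers into pattern-sized chunks and zipping each chunk
-- against the whole pattern, instead of A's single loop with three manually reset cyclic counters;
-- objective: alternative (same O(n) cost, no index/counter state).

-- ===== PORT A =====
-- the three hard-coded answer patterns of A
def studentsA : List (List Int) :=
  [[1, 2, 3, 4, 5], [2, 1, 2, 3, 2, 4, 2, 5], [3, 3, 1, 1, 2, 2, 4, 4, 5, 5]]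

-- one iteration of A's loop body: bump each score on a match, advance each cyclic counter with A's reset-to-0 test
def stepA (st : Int × Int × Int × Nat × Nat × Nat) (a : Int) : Int × Int × Int × Nat × Nat × Nat :=
  let (s1, s2, s3, r1, r2, r3) := st
  let s1 := if a = (studentsA.getD 0 []).getD r1 0 then s1 + 1 else s1
  let s2 := if a = (studentsA.getD 1 []).getD r2 0 then s2 + 1 else s2
  let s3 := if a = (studentsA.getD 2 []).getD r3 0 then s3 + 1 else s3
  let r1 := if r1 = (studentsA.getD 0 []).length - 1 then 0 else r1 + 1
  let r2 := if r2 = (studentsA.getD 1 []).length - 1 then 0 else r2 + 1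
  let r3 := if r3 = (studentsA.getD 2 []).length - 1 then 0 else r3 + 1
  (s1, s2, s3, r1, r2, r3)

def solution (answers : List Int) : List Int :=
  let st := answers.foldl stepA (0, 0, 0, 0, 0, 0)
  let score : List Int := [st.1, st.2.1, st.2.2.1]
  let m := (PySem.List.max? score (fun y => y)).getD 0
  (List.range 3).foldl (fun acc j => if m = score.getD j 0 then acc ++ [(j : Int) + 1] else acc) []

-- ===== PORT B =====
-- sum(x == y for x, y in zip(chunk, p))
def matchCount (p chunk : List Int) : Int :=
  (chunk.zip p).foldl (fun s xy => s + (if xy.1 = xy.2 then 1 else 0)) 0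

-- B's 'while i < len(l):' loop; the patterns fed to it are the nonempty literals, taken
-- here as head ph and tail pt so the step i += len(p) is visibly positive.
-- l[i:i+len(p)] with 0 <= i is (l.drop i).take (len p): exact for the in-range i used.
def scoreLoop (ph : Int) (pt : List Int) (l : List Int) (i : Nat) : Int :=
  if i < l.length then
    matchCount (ph :: pt) ((l.drop i).take (ph :: pt).length) + scoreLoop ph pt l (i + (ph :: pt).length)
  else 0
termination_by l.length - i
decreasing_by simp at *; omega

def scoreB (p : List Int) (l : List Int) : Int :=
  match p with
  | [] => 0  -- unreachable: the three patterns are nonempty literals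
  | ph :: pt => scoreLoop ph pt l 0

def solution_alt (answers : List Int) : List Int :=
  let patterns : List (List Int) :=
    [[1, 2, 3, 4, 5], [2, 1, 2, 3, 2, 4, 2, 5], [3, 3, 1, 1, 2, 2, 4, 4, 5, 5]]
  let scores := patterns.map (fun p => scoreB p answers)
  let best := (PySem.List.max? scores (fun y => y)).getD 0
  scores.zipIdx.filterMap (fun sj => if sj.1 = best then some ((sj.2 : Int) + 1) else none)

-- ===== PRECONDITION & SPEC =====
def Spec_solution (answers : List Int) (out : List Int) : Prop := out = solution_alt answers
instance (answers : List Int) (out : List Int) : Decidable (Spec_solution answers out) := by unfold Spec_solution; infer_instance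

-- ===== CLAIM (what is proved, stated in full; the proofs are below) =====
def Claim_equal_solution : Prop := ∀ (answers : List Int), Dom_solution answers → Spec_solution answers (solution answers)

-- ===== LEMMAS AND PROOFS =====

-- matches of pattern p against l starting at cyclic position r (reference characterisation)
def cnt (p : List Int) : Nat → List Int → Int
  | _, [] => 0
  | r, a :: l => (if a = p.getD r 0 then (1 : Int) else 0) + cnt p ((r + 1) % p.length) l

theorem cnt_nil (p : List Int) (r : Nat) : cnt p r [] = 0 := rfl
theorem cnt_cons (p : List Int) (r : Nat) (a : Int) (l : List Int) :
    cnt p r (a :: l) = (if a = p.getD r 0 then (1 : Int) else 0) + cnt p ((r + 1) % p.length) l := rfl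

theorem foldA_cnt : ∀ (l : List Int) (s1 s2 s3 : Int) (r1 r2 r3 : Nat),
    r1 < 5 → r2 < 8 → r3 < 10 →
    ∃ q1 q2 q3, l.foldl stepA (s1, s2, s3, r1, r2, r3) =
      (s1 + cnt [1, 2, 3, 4, 5] r1 l,
       s2 + cnt [2, 1, 2, 3, 2, 4, 2, 5] r2 l,
       s3 + cnt [3, 3, 1, 1, 2, 2, 4, 4, 5, 5] r3 l, q1, q2, q3) := by
  intro l
  induction l with
  | nil => intro s1 s2 s3 r1 r2 r3 _ _ _; exact ⟨r1, r2, r3, by simp [cnt_nil]⟩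
  | cons a l ih =>
    intro s1 s2 s3 r1 r2 r3 h1 h2 h3
    have e1 : (if r1 = 4 then 0 else r1 + 1) = (r1 + 1) % 5 := by split_ifs <;> omega
    have e2 : (if r2 = 7 then 0 else r2 + 1) = (r2 + 1) % 8 := by split_ifs <;> omega
    have e3 : (if r3 = 9 then 0 else r3 + 1) = (r3 + 1) % 10 := by split_ifs <;> omega
    obtain ⟨q1, q2, q3, hq⟩ :=
      ih (if a = ([1, 2, 3, 4, 5] : List Int).getD r1 0 then s1 + 1 else s1)
         (if a = ([2, 1, 2, 3, 2, 4, 2, 5] : List Int).getD r2 0 then s2 + 1 else s2)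
         (if a = ([3, 3, 1, 1, 2, 2, 4, 4, 5, 5] : List Int).getD r3 0 then s3 + 1 else s3)
         ((r1 + 1) % 5) ((r2 + 1) % 8) ((r3 + 1) % 10)
         (Nat.mod_lt _ (by omega)) (Nat.mod_lt _ (by omega)) (Nat.mod_lt _ (by omega))
    refine ⟨q1, q2, q3, ?_⟩
    have hs0 : studentsA.getD 0 [] = [1, 2, 3, 4, 5] := rfl
    have hs1 : studentsA.getD 1 [] = [2, 1, 2, 3, 2, 4, 2, 5] := rfl
    have hs2 : studentsA.getD 2 [] = [3, 3, 1, 1, 2, 2, 4, 4, 5, 5] := rfl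
    have hl0 : ([1, 2, 3, 4, 5] : List Int).length - 1 = 4 := rfl
    have hl1 : ([2, 1, 2, 3, 2, 4, 2, 5] : List Int).length - 1 = 7 := rfl
    have hl2 : ([3, 3, 1, 1, 2, 2, 4, 4, 5, 5] : List Int).length - 1 = 9 := rfl
    simp only [List.foldl_cons, stepA, hs0, hs1, hs2, hl0, hl1, hl2, e1, e2, e3]
    rw [hq]
    have hL0 : ([1, 2, 3, 4, 5] : List Int).length = 5 := rfl
    have hL1 : ([2, 1, 2, 3, 2, 4, 2, 5] : List Int).length = 8 := rfl
    have hL2 : ([3, 3, 1, 1, 2, 2, 4, 4, 5, 5] : List Int).length = 10 := rfl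
    simp only [cnt_cons, hL0, hL1, hL2, Prod.mk.injEq]
    refine ⟨?_, ?_, ?_, trivial⟩ <;> split_ifs <;> ring

-- proof-side reference: the tail-recursive chunk recursion
def scoreChunks (p : List Int) : List Int → Int
  | [] => 0
  | a :: t => matchCount p ((a :: t).take p.length) + scoreChunks p (t.drop (p.length - 1))
termination_by l => l.length
decreasing_by simp

theorem sc_nil (p : List Int) : scoreChunks p [] = 0 := by rw [scoreChunks]
theorem sc_cons (p : List Int) (a : Int) (t : List Int) :
    scoreChunks p (a :: t)
      = matchCount p ((a :: t).take p.length) + scoreChunks p (t.drop (p.length - 1)) := by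
  rw [scoreChunks]

-- recursion form of matchCount's fold
def cntZip : List (Int × Int) → Int
  | [] => 0
  | xy :: t => (if xy.1 = xy.2 then (1 : Int) else 0) + cntZip t

theorem matchCount_aux (l : List (Int × Int)) : ∀ s : Int,
    l.foldl (fun s xy => s + (if xy.1 = xy.2 then 1 else 0)) s = s + cntZip l := by
  induction l with
  | nil => intro s; simp [cntZip]
  | cons xy t ih => intro s; simp only [List.foldl_cons, ih, cntZip]; ring

theorem matchCount_eq (p chunk : List Int) : matchCount p chunk = cntZip (chunk.zip p) := by
  unfold matchCount; rw [matchCount_aux]; ring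

-- a chunk that fits in the remaining pattern tail scores exactly its cyclic count
theorem cntZip_zip_eq_cnt (p : List Int) : ∀ (chunk : List Int) (r : Nat),
    r + chunk.length ≤ p.length → cntZip (chunk.zip (p.drop r)) = cnt p r chunk := by
  intro chunk
  induction chunk with
  | nil => intro r _; simp [cntZip, cnt_nil]
  | cons a t ih =>
    intro r h
    have hr : r < p.length := by simp at h; omega
    rw [List.drop_eq_getElem_cons hr]
    simp only [List.zip_cons_cons, cntZip]
    have hget : p.getD r 0 = p[r] := List.getD_eq_getElem p 0 hr
    rw [cnt_cons, hget]
    rcases t with _ | ⟨b, t'⟩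
    · simp [cntZip, cnt_nil]
    · have hlt : r + 1 < p.length := by simp at h ⊢; omega
      have : (r + 1) % p.length = r + 1 := Nat.mod_eq_of_lt hlt
      rw [this, ih (r + 1) (by simp at h ⊢; omega)]

-- splitting the answer list splits the cyclic count
theorem cnt_append (p : List Int) (hp : 0 < p.length) : ∀ (chunk rest : List Int) (r : Nat),
    r < p.length →
    cnt p r (chunk ++ rest) = cnt p r chunk + cnt p ((r + chunk.length) % p.length) rest := by
  intro chunk
  induction chunk with
  | nil => intro rest r hr; simp [cnt_nil, Nat.mod_eq_of_lt hr]
  | cons a t ih =>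
    intro rest r hr
    simp only [List.cons_append, cnt_cons]
    rw [ih rest ((r + 1) % p.length) (Nat.mod_lt _ hp)]
    have : ((r + 1) % p.length + t.length) % p.length = (r + (t.length + 1)) % p.length := by
      conv_rhs => rw [show r + (t.length + 1) = (r + 1) + t.length by ring, Nat.add_mod]
      rw [Nat.add_mod ((r + 1) % p.length) t.length]; simp
    simp only [List.length_cons, this]
    ring

theorem cntZip_zip_eq_cnt0 (p chunk : List Int) (h : chunk.length ≤ p.length) :
    cntZip (chunk.zip p) = cnt p 0 chunk := by
  have := cntZip_zip_eq_cnt p chunk 0 (by omega)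
  simpa using this

theorem scoreChunks_eq_cnt (p : List Int) (hp : 0 < p.length) (l : List Int) :
    scoreChunks p l = cnt p 0 l := by
  induction hn : l.length using Nat.strong_induction_on generalizing l with
  | _ n ih =>
    rcases l with _ | ⟨a, t⟩
    · simp [sc_nil, cnt_nil]
    · rw [sc_cons]
      have hdrop : t.drop (p.length - 1) = (a :: t).drop p.length := by
        rcases p with _ | ⟨x, q⟩
        · simp at hp
        · simp
      have hsplit : (a :: t) = (a :: t).take p.length ++ (a :: t).drop p.length :=
        (List.take_append_drop _ _).symm
      by_cases hlen : p.length ≤ (a :: t).length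
      · have htk : ((a :: t).take p.length).length = p.length := by
          simp at hlen ⊢; omega
        conv_rhs => rw [hsplit]
        rw [cnt_append p hp _ _ 0 hp]
        rw [htk, Nat.zero_add, Nat.mod_self]
        rw [matchCount_eq, cntZip_zip_eq_cnt0 p _ (by omega)]
        congr 1
        rw [hdrop]
        rcases hd : (a :: t).drop p.length with _ | ⟨b, t'⟩
        · simp [cnt_nil, sc_nil]
        · have hlt : ((a :: t).drop p.length).length < n := by
            subst hn; simp; omega
          rw [← hd]
          exact ih _ (by simpa using hlt) _ rfl
      · -- the last (short) chunk: drop is empty, take is everything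
        have hsh : (a :: t).length < p.length := by omega
        have hdr : (a :: t).drop p.length = [] := List.drop_eq_nil_of_le (by omega)
        have htk : (a :: t).take p.length = a :: t := List.take_of_length_le (by omega)
        rw [hdrop, hdr, htk]
        rw [matchCount_eq, cntZip_zip_eq_cnt0 p _ (by omega)]
        simp [sc_nil]

theorem scoreLoop_eq_scoreChunks (ph : Int) (pt l : List Int) : ∀ i : Nat,
    scoreLoop ph pt l i = scoreChunks (ph :: pt) (l.drop i) := by
  intro i
  induction hn : l.length - i using Nat.strong_induction_on generalizing i with
  | _ n ih =>
    rw [scoreLoop]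
    by_cases h : i < l.length
    · simp only [h, if_true]
      rcases hd : l.drop i with _ | ⟨b, rest⟩
      · exfalso
        have hh : (l.drop i).length = l.length - i := by simp
        rw [hd] at hh; simp at hh; omega
      · rw [sc_cons]
        have h2 : rest.drop ((ph :: pt).length - 1) = l.drop (i + (ph :: pt).length) := by
          have hh : rest.drop ((ph :: pt).length - 1) = (b :: rest).drop (ph :: pt).length := by simp
          rw [hh, ← hd, List.drop_drop]
        rw [h2, ih (l.length - (i + (ph :: pt).length)) (by simp; omega) _ rfl]
    · simp only [h, if_false]
      have : l.drop i = [] := List.drop_eq_nil_of_le (by omega)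
      rw [this, sc_nil]

theorem scoreB_eq_cnt (p : List Int) (hp : 0 < p.length) (l : List Int) :
    scoreB p l = cnt p 0 l := by
  rcases p with _ | ⟨ph, pt⟩
  · simp at hp
  · show scoreLoop ph pt l 0 = cnt (ph :: pt) 0 l
    rw [scoreLoop_eq_scoreChunks, List.drop_zero, scoreChunks_eq_cnt _ (by simp)]

-- once the three scores agree, A's final range(3) loop and B's filterMap produce the same list
theorem final_eq (c1 c2 c3 : Int) :
    (let score : List Int := [c1, c2, c3]
     let m := (PySem.List.max? score (fun y => y)).getD 0
     (List.range 3).foldl (fun acc j => if m = score.getD j 0 then acc ++ [(j : Int) + 1] else acc) [])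
    =
    (let scores : List Int := [c1, c2, c3]
     let best := (PySem.List.max? scores (fun y => y)).getD 0
     scores.zipIdx.filterMap (fun sj => if sj.1 = best then some ((sj.2 : Int) + 1) else none)) := by
  have hz : (([c1, c2, c3] : List Int).zipIdx) = [(c1, 0), (c2, 1), (c3, 2)] := rfl
  have hr : List.range 3 = [0, 1, 2] := rfl
  simp only [hr, List.foldl_cons, List.foldl_nil]
  simp only [hz, List.filterMap_cons, List.filterMap_nil]
  simp only [PySem.List.max?_id_cons, Option.getD_some, List.foldl_cons, List.foldl_nil]
  simp only [List.getD_cons_zero, List.getD_cons_succ]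
  split_ifs <;> first | rfl | (exfalso; omega)

theorem solution_eq (answers : List Int) : solution answers = solution_alt answers := by
  obtain ⟨q1, q2, q3, hq⟩ := foldA_cnt answers 0 0 0 0 0 0 (by omega) (by omega) (by omega)
  unfold solution solution_alt
  rw [hq]
  have h1 : scoreB [1, 2, 3, 4, 5] answers = cnt [1, 2, 3, 4, 5] 0 answers :=
    scoreB_eq_cnt _ (by simp) answers
  have h2 : scoreB [2, 1, 2, 3, 2, 4, 2, 5] answers
      = cnt [2, 1, 2, 3, 2, 4, 2, 5] 0 answers := scoreB_eq_cnt _ (by simp) answers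
  have h3 : scoreB [3, 3, 1, 1, 2, 2, 4, 4, 5, 5] answers
      = cnt [3, 3, 1, 1, 2, 2, 4, 4, 5, 5] 0 answers := scoreB_eq_cnt _ (by simp) answers
  simp only [List.map_cons, List.map_nil, h1, h2, h3]
  simpa using final_eq (cnt [1,2,3,4,5] 0 answers) (cnt [2,1,2,3,2,4,2,5] 0 answers)
    (cnt [3,3,1,1,2,2,4,4,5,5] 0 answers)

-- ===== VERDICT (by name: the statement is the Claim_ definition above) =====
theorem solution_spec : Claim_equal_solution := by
  intro answers _
  unfold Spec_solution
  exact solution_eq answers
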